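-- pv_equiv track=rewrite | github.com/kiangkiangkiang/LeetCode-History | daily/p861.py | rotate_hor
-- ===== SOURCE A (Python) =====
-- def rotate_hor(grid, index_h):
--     zero = 0
--     one = 0
--     for i, ele in enumerate(grid[index_h]):
--         if ele == 1:
--             one += 2 ** (len(grid[index_h]) - i - 1)
--             grid[index_h][i] = 0
--         else:
--             zero += 2 ** (len(grid[index_h]) - i - 1)
--             grid[index_h][i] = 1
--     return grid, zero - one
-- ===== SOURCE B (Python) =====
-- def rotate_hor(grid, index_h):
--     # Mutates grid[index_h] in place, like the original.
--     row = grid[index_h]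
--     one = 0
--     for e in row:                       # Horner parse of the row as a binary number (1 <-> bit 1)
--         one = 2 * one + (1 if e == 1 else 0)
--     row[:] = [0 if e == 1 else 1 for e in row]   # flip in place, preserving object identity
--     return grid, (2 ** len(row) - 1) - 2 * one   # zero + one = 2**n - 1, so zero - one = (2**n-1) - 2*one
-- ===== Notes on version B (the rewrite author's own statement) =====
-- stated objective: simpler
-- what changed: Replaces the fused loop that accumulates two power-of-two sums while setting each cell with a Horner parse of the row as a binary number, a closed-form complement (zero - one = 2**n - 1 - 2*one), and a separate slice-assignment flip pass.
import Mathlib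
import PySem

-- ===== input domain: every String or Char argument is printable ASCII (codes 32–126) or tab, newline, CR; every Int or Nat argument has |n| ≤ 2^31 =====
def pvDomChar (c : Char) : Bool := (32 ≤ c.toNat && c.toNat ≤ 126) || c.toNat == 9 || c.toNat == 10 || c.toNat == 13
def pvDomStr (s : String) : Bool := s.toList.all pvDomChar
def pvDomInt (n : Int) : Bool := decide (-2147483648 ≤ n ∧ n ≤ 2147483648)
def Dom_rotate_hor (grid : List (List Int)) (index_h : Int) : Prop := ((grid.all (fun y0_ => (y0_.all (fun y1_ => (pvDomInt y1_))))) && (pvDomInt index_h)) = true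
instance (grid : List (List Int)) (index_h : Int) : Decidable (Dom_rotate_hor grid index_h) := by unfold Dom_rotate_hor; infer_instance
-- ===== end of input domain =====

-- ===== PORT A =====
-- Port of A: fused loop over enumerate(row) accumulating two power-of-two sums while
-- setting each cell in place (stepA is one iteration of the Python for-body).
-- Both Pythons mutate grid[index_h] in place; the equivalence proved is about the return
-- value, which contains the mutated grid.
def stepA (s : Int × Int × List Int) (p : Int × Int) : Int × Int × List Int :=
  let zero := s.1; let one := s.2.1; let row := s.2.2
  let i := p.1; let ele := p.2
  if ele == 1 then
    (zero, one + 2 ^ (row.length - (i.toNat + 1)), row.set i.toNat 0)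
  else
    (zero + 2 ^ (row.length - (i.toNat + 1)), one, row.set i.toNat 1)

def rotate_hor (grid : List (List Int)) (index_h : Int) : List (List Int) × Int :=
  match PySem.List.pyGet? grid index_h with
  | none => (grid, 0)   -- IndexError; excluded by Pre_rotate_hor
  | some row0 =>
    let st := (PySem.List.enumerate row0 0).foldl stepA ((0 : Int), (0 : Int), row0)
    let j := (if index_h < 0 then index_h + grid.length else index_h).toNat
    (grid.set j st.2.2, st.1 - st.2.1)

-- ===== PORT B =====
-- Port of B: Horner parse of the row as a binary number, closed-form complement
-- (2^n - 1) - 2*one, and a separate flip pass (map).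
def rotate_hor_alt (grid : List (List Int)) (index_h : Int) : List (List Int) × Int :=
  match PySem.List.pyGet? grid index_h with
  | none => (grid, 0)   -- IndexError; excluded by Pre_rotate_hor
  | some row =>
    let one := row.foldl (fun (a : Int) (e : Int) => 2 * a + (if e == 1 then 1 else 0)) 0
    let newRow := row.map (fun e => if e == 1 then (0 : Int) else 1)
    let j := (if index_h < 0 then index_h + grid.length else index_h).toNat
    (grid.set j newRow, (2 ^ row.length - 1) - 2 * one)

-- ===== PRECONDITION & SPEC =====
-- Pre_: index_h must be a valid (possibly negative) Python index into grid; otherwise A raises IndexError.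
def Pre_rotate_hor (grid : List (List Int)) (index_h : Int) : Prop :=
  PySem.Raise.InRange grid.length index_h
instance (grid : List (List Int)) (index_h : Int) : Decidable (Pre_rotate_hor grid index_h) := by unfold Pre_rotate_hor; infer_instance
def pvWitness_rotate_hor : List (List Int) × Int := ([[1, 0, 1], [0, 0]], 0)
def Spec_rotate_hor (grid : List (List Int)) (index_h : Int) (out : List (List Int) × Int) : Prop := out = rotate_hor_alt grid index_h
instance (grid : List (List Int)) (index_h : Int) (out : List (List Int) × Int) : Decidable (Spec_rotate_hor grid index_h out) := by unfold Spec_rotate_hor; infer_instance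

-- ===== CLAIM (what is proved, stated in full; the proofs are below) =====
def Claim_equal_rotate_hor : Prop := ∀ (grid : List (List Int)) (index_h : Int), Dom_rotate_hor grid index_h → Pre_rotate_hor grid index_h → Spec_rotate_hor grid index_h (rotate_hor grid index_h)

-- ===== LEMMAS AND PROOFS =====

-- value of the 1-bits of a row read as a binary number (structural form used by the invariant)
def oneVal : List Int → Int
  | [] => 0
  | e :: rest => (if e == 1 then 2 ^ rest.length else 0) + oneVal rest

-- complementary value accumulated by A in `zero`
def zeroVal : List Int → Int
  | [] => 0
  | e :: rest => (if e == 1 then 0 else 2 ^ rest.length) + zeroVal rest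

lemma zeroVal_add_oneVal (row : List Int) : zeroVal row + oneVal row = 2 ^ row.length - 1 := by
  induction row with
  | nil => simp [zeroVal, oneVal]
  | cons e rest ih =>
    simp only [zeroVal, oneVal, List.length_cons, pow_succ]
    split_ifs <;> omega

lemma horner_eq_oneVal (row : List Int) (a : Int) :
    row.foldl (fun (a : Int) (e : Int) => 2 * a + (if e == 1 then 1 else 0)) a
      = a * 2 ^ row.length + oneVal row := by
  induction row generalizing a with
  | nil => simp [oneVal]
  | cons e rest ih =>
    simp only [List.foldl_cons, ih, oneVal, List.length_cons, pow_succ]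
    split_ifs <;> ring

-- the loop invariant of A's fused loop: after the prefix has been processed, the state is
-- (accumulated zero, accumulated one, flipped prefix ++ untouched suffix)
lemma foldA_invariant (post : List Int) : ∀ (pre : List Int) (z o : Int),
    (PySem.List.enumerate post (pre.length : Int)).foldl stepA (z, o, pre ++ post)
    = (z + zeroVal post, o + oneVal post,
       pre ++ post.map (fun e => if e == 1 then (0 : Int) else 1)) := by
  induction post with
  | nil => intro pre z o; simp [PySem.List.enumerate_nil, zeroVal, oneVal]
  | cons e rest ih =>
    intro pre z o
    rw [PySem.List.enumerate_cons, List.foldl_cons]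
    have hset : ∀ v : Int, (pre ++ e :: rest).set pre.length v = (pre ++ [v]) ++ rest := by
      intro v; simp
    have hlen : (pre ++ e :: rest).length - (pre.length + 1) = rest.length := by
      simp; omega
    have hstep : ∀ z' o' : Int, stepA (z', o', pre ++ e :: rest) ((pre.length : Int), e)
        = if e == 1 then (z', o' + 2 ^ rest.length, (pre ++ [(0:Int)]) ++ rest)
          else (z' + 2 ^ rest.length, o', (pre ++ [(1:Int)]) ++ rest) := by
      intro z' o'
      simp only [stepA, Int.toNat_natCast, hlen, hset]
    rw [hstep]
    by_cases he : (e == 1) = true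
    · rw [if_pos he]
      have hl : (pre.length : Int) + 1 = (((pre ++ [(0:Int)]).length : Nat) : Int) := by simp
      rw [hl, ih (pre ++ [(0:Int)])]
      simp only [zeroVal, oneVal, he, if_true, List.map_cons, List.append_assoc,
        List.cons_append, Prod.mk.injEq]
      refine ⟨by ring, by ring, rfl⟩
    · rw [if_neg he]
      have hl : (pre.length : Int) + 1 = (((pre ++ [(1:Int)]).length : Nat) : Int) := by simp
      rw [hl, ih (pre ++ [(1:Int)])]
      simp only [zeroVal, oneVal, he, if_false, List.map_cons, List.append_assoc,
        Bool.false_eq_true, List.cons_append, Prod.mk.injEq]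
      refine ⟨by ring, by ring, rfl⟩

-- ===== VERDICT (by name: the statement is the Claim_ definition above) =====
theorem rotate_hor_spec : Claim_equal_rotate_hor := by
  intro grid index_h _ hpre
  have hne : PySem.List.pyGet? grid index_h ≠ none := by
    intro hc
    exact (PySem.List.pyGet?_eq_none_iff grid index_h).mp hc hpre
  obtain ⟨row0, hrow⟩ := Option.ne_none_iff_exists'.mp hne
  unfold Spec_rotate_hor rotate_hor rotate_hor_alt
  rw [hrow]
  have hfold := foldA_invariant row0 [] 0 0
  simp only [List.length_nil, Nat.cast_zero, List.nil_append, zero_add] at hfold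
  simp only [hfold, horner_eq_oneVal row0 0, zero_mul, zero_add, Prod.mk.injEq]
  exact ⟨trivial, by have := zeroVal_add_oneVal row0; omega⟩
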